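-- pv_equiv track=rewrite | github.com/nkcs-iclab/spellxpert | csc/datasets/detection.py | add_error_tags
-- ===== SOURCE A (Python) =====
-- def add_error_tags(string: str, errors: list, opening_tag: str, closing_tag: str) -> str:
--     errors = {error[0] for error in errors}
--     output_string = ''
--     for index, char in enumerate(string):
--         if index + 1 in errors:
--             output_string += f'{opening_tag}{char}{closing_tag}'
--         else:
--             output_string += char
--     return output_string
-- ===== SOURCE B (Python) =====
-- def add_error_tags(string: str, errors: list, opening_tag: str, closing_tag: str) -> str:
--     chars = list(string)
--     for pos in {error[0] for error in errors}:
--         if 1 <= pos <= len(string):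
--             chars[pos - 1] = f'{opening_tag}{chars[pos - 1]}{closing_tag}'
--     return ''.join(chars)
-- ===== Notes on version B (the rewrite author's own statement) =====
-- stated objective: alternative
-- what changed: B edits a mutable char buffer at the (deduplicated, range-checked) error positions and joins it, instead of scanning every character with a set-membership test as A does.
import Mathlib
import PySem

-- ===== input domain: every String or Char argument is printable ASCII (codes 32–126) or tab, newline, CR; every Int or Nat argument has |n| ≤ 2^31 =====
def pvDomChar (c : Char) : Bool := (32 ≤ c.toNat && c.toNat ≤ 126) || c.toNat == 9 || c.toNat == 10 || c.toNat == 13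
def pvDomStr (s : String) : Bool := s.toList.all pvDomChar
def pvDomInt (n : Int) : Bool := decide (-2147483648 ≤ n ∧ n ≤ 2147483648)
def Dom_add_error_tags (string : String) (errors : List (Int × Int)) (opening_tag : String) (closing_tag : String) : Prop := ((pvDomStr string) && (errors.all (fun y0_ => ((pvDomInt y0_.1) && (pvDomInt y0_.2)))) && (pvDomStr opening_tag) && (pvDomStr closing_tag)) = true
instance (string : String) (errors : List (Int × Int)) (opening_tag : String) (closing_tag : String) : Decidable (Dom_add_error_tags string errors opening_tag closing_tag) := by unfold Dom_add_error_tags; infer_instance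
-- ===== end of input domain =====

-- B edits a buffer of per-character pieces at the deduplicated, range-checked error
-- positions and joins it, instead of scanning every character with a membership test.

-- ===== PORT A =====
def add_error_tags (string : String) (errors : List (Int × Int)) (opening_tag : String) (closing_tag : String) : String :=
  -- errors = {error[0] for error in errors}
  let errs : PySem.Set Int := PySem.Set.ofList (errors.map (·.1))
  -- for index, char in enumerate(string): output_string += (tagged or plain char)
  let out : List Char :=
    (PySem.List.enumerate string.toList).foldl
      (fun acc ic =>
        if PySem.Set.contains errs (ic.1 + 1) then
          acc ++ (opening_tag.toList ++ [ic.2] ++ closing_tag.toList)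
        else
          acc ++ [ic.2]) []
  String.mk out

-- ===== PORT B =====
def add_error_tags_alt (string : String) (errors : List (Int × Int)) (opening_tag : String) (closing_tag : String) : String :=
  -- chars = list(string)  (as one-element pieces, so a slot can hold the tagged string)
  let n : Int := (string.toList.length : Int)
  let chars0 : List (List Char) := string.toList.map (fun c => [c])
  -- for pos in {error[0] for error in errors}: if 1 <= pos <= len(string): chars[pos-1] = tagged
  let chars :=
    (PySem.Set.ofList (errors.map (·.1))).foldl
      (fun acc p =>
        if 1 ≤ p ∧ p ≤ n then
          acc.set (p - 1).toNat (opening_tag.toList ++ acc.getD (p - 1).toNat [] ++ closing_tag.toList)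
        else acc) chars0
  -- return ''.join(chars)
  String.mk chars.flatten

-- ===== PRECONDITION & SPEC =====
def Spec_add_error_tags (string : String) (errors : List (Int × Int)) (opening_tag : String) (closing_tag : String) (out : String) : Prop := out = add_error_tags_alt string errors opening_tag closing_tag
instance (string : String) (errors : List (Int × Int)) (opening_tag : String) (closing_tag : String) (out : String) : Decidable (Spec_add_error_tags string errors opening_tag closing_tag out) := by unfold Spec_add_error_tags; infer_instance

-- ===== CLAIM (what is proved, stated in full; the proofs are below) =====
def Claim_equal_add_error_tags : Prop := ∀ (string : String) (errors : List (Int × Int)) (opening_tag : String) (closing_tag : String), Dom_add_error_tags string errors opening_tag closing_tag → Spec_add_error_tags string errors opening_tag closing_tag (add_error_tags string errors opening_tag closing_tag)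

-- ===== LEMMAS AND PROOFS =====

-- B's fold of in-place edits, characterised: with distinct positions, slot j ends up
-- tagged iff j+1 occurs among the positions (range-checked against the fixed n).
theorem pv_fold_set_eq_mapIdx (ot ct : List Char) (n : Int)
    (ls : List Int) (hnd : ls.Nodup) :
    ∀ (css : List (List Char)), (css.length : Int) = n →
      (ls.foldl
        (fun acc p =>
          if 1 ≤ p ∧ p ≤ n then
            acc.set (p - 1).toNat (ot ++ acc.getD (p - 1).toNat [] ++ ct)
          else acc) css)
      = css.mapIdx (fun j s => if ((j : Int) + 1) ∈ ls then ot ++ s ++ ct else s) := by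
  induction ls with
  | nil =>
    intro css _
    apply List.ext_getElem <;> simp
  | cons p ls ih =>
    intro css hlen
    rcases List.nodup_cons.mp hnd with ⟨hp, hnd'⟩
    rw [List.foldl_cons]
    by_cases hg : 1 ≤ p ∧ p ≤ n
    · have hi : (p - 1).toNat < css.length := by omega
      have hgetD : css.getD (p - 1).toNat [] = css[(p - 1).toNat] :=
        List.getD_eq_getElem css [] hi
      rw [if_pos hg, hgetD,
        ih hnd' _ (by rw [List.length_set]; exact hlen)]
      apply List.ext_getElem (by simp)
      intro j hj₁ hj₂
      simp only [List.getElem_mapIdx, List.getElem_set] at *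
      by_cases hji : (p - 1).toNat = j
      · subst hji
        have hjp2 : ((p.toNat - 1 : Nat) : Int) + 1 = p := by omega
        simp [hjp2, hp]
      · have hjp : (j : Int) + 1 ≠ p := by omega
        have hji2 : ¬ (p.toNat - 1 = j) := by omega
        simp [hji2, hjp]
    · rw [if_neg hg, ih hnd' _ hlen]
      apply List.ext_getElem (by simp)
      intro j hj₁ hj₂
      simp only [List.getElem_mapIdx] at *
      have hjlen : j < css.length := by simpa using hj₁
      have hjp : (j : Int) + 1 ≠ p := by omega
      simp [hjp]

-- ===== VERDICT =====
theorem add_error_tags_spec : Claim_equal_add_error_tags := by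
  intro string errors opening_tag closing_tag _
  unfold Spec_add_error_tags add_error_tags add_error_tags_alt
  simp only []
  set cs := string.toList with hcs
  set S : PySem.Set Int := PySem.Set.ofList (errors.map (·.1)) with hS
  congr 1
  -- A's loop as a flatMap
  have hA :
      (PySem.List.enumerate cs).foldl
        (fun acc ic =>
          if PySem.Set.contains S (ic.1 + 1) then
            acc ++ (opening_tag.toList ++ [ic.2] ++ closing_tag.toList)
          else
            acc ++ [ic.2]) []
      = (PySem.List.enumerate cs).flatMap
          (fun ic =>
            if PySem.Set.contains S (ic.1 + 1) then
              opening_tag.toList ++ [ic.2] ++ closing_tag.toList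
            else [ic.2]) := by
    have hfun :
        (fun (acc : List Char) (ic : Int × Char) =>
          if PySem.Set.contains S (ic.1 + 1) then
            acc ++ (opening_tag.toList ++ [ic.2] ++ closing_tag.toList)
          else acc ++ [ic.2])
        = fun acc ic =>
            acc ++ (if PySem.Set.contains S (ic.1 + 1) then
              opening_tag.toList ++ [ic.2] ++ closing_tag.toList
            else [ic.2]) := by
      funext acc ic; split <;> rfl
    rw [hfun, PySem.List.foldl_append_eq_flatMap, List.nil_append]
  rw [hA]
  -- B's loop as a mapIdx over the buffer
  rw [pv_fold_set_eq_mapIdx opening_tag.toList closing_tag.toList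
        ((cs.length : Int)) S (PySem.Set.nodup_ofList _) (cs.map (fun c => [c])) (by simp)]
  -- both sides are the flatten of the same list of pieces
  rw [List.flatMap_def]
  congr 1
  apply List.ext_getElem (by simp [PySem.List.length_enumerate])
  intro k hk₁ hk₂
  have hkcs : k < cs.length := by
    simpa [PySem.List.length_enumerate] using hk₁
  simp only [List.getElem_map, List.getElem_mapIdx,
    PySem.List.getElem_enumerate]
  have hmem : (PySem.Set.contains S ((0 + (k : Int)) + 1) = true)
      ↔ (((k : Int) + 1) ∈ S) := by
    rw [PySem.Set.contains_iff]; norm_num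
  by_cases h : ((k : Int) + 1) ∈ S
  · rw [if_pos (hmem.mpr h), if_pos h]
  · rw [if_neg (fun hh => h (hmem.mp hh)), if_neg h]
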